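-- pv_equiv track=rewrite | github.com/paiml/depyler | examples/hard_simpson_rule.py | trapezoid_integrate_scaled
-- ===== SOURCE A (Python) =====
-- def trapezoid_integrate_scaled(a: int, b: int, c: int, lo: int, hi: int, n: int, scale: int) -> int:
--     # Trapezoidal rule for f(x) = a*x^2 + b*x + c
--     h: int = (hi - lo) // n
--     f_lo: int = a * lo * lo + b * lo * scale + c * scale * scale
--     f_hi: int = a * hi * hi + b * hi * scale + c * scale * scale
--     total: int = (f_lo + f_hi) // 2
--     i: int = 1
--     while i < n:
--         x: int = lo + i * h
--         fx: int = a * x * x + b * x * scale + c * scale * scale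
--         total = total + fx
--         i = i + 1
--     return total * h // (scale * scale)
-- ===== SOURCE B (Python) =====
-- def trapezoid_integrate_scaled(a: int, b: int, c: int, lo: int, hi: int, n: int, scale: int) -> int:
--     # Closed-form trapezoidal sum: interior points via Gauss / square-pyramidal formulas, O(1).
--     h = (hi - lo) // n
--     m = n - 1 if n > 1 else 0
--     s1 = m * (m + 1) // 2
--     s2 = m * (m + 1) * (2 * m + 1) // 6
--     sx = m * lo + h * s1
--     sxx = m * lo * lo + 2 * lo * h * s1 + h * h * s2
--     f_lo = a * lo * lo + b * lo * scale + c * scale * scale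
--     f_hi = a * hi * hi + b * hi * scale + c * scale * scale
--     total = (f_lo + f_hi) // 2 + a * sxx + b * scale * sx + m * c * scale * scale
--     return total * h // (scale * scale)
-- ===== Notes on version B (the rewrite author's own statement) =====
-- stated objective: faster
-- what changed: Replaces the O(n) while-loop summing the quadratic at each interior grid point by O(1) closed-form sums using the Gauss and square-pyramidal formulas.
import Mathlib
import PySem

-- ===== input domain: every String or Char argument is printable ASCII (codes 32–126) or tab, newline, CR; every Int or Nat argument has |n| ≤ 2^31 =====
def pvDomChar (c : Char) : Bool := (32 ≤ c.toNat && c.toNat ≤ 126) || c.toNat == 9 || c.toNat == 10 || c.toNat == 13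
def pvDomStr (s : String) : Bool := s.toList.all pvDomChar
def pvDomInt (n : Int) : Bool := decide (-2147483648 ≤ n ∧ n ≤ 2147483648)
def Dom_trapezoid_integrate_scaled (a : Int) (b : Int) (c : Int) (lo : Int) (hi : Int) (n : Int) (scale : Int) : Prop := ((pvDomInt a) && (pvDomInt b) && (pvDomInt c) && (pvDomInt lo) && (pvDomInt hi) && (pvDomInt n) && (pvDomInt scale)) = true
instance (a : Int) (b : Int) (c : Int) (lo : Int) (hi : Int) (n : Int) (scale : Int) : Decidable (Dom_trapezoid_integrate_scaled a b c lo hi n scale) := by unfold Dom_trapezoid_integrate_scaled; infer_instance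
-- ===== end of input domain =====

-- B replaces A's O(n) interior-point loop by O(1) closed-form sums (Gauss / square-pyramidal formulas).

-- ===== PORT A =====
-- the while loop of A, step for step
def pvLoopA (a b c lo scale h n : Int) (i : Int) (total : Int) : Int :=
  if i < n then
    let x : Int := lo + i * h
    let fx : Int := a * x * x + b * x * scale + c * scale * scale
    pvLoopA a b c lo scale h n (i + 1) (total + fx)
  else total
termination_by (n - i).toNat
decreasing_by omega

def trapezoid_integrate_scaled (a : Int) (b : Int) (c : Int) (lo : Int) (hi : Int) (n : Int) (scale : Int) : Int :=
  let h : Int := PySem.Int.floordiv (hi - lo) n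
  let f_lo : Int := a * lo * lo + b * lo * scale + c * scale * scale
  let f_hi : Int := a * hi * hi + b * hi * scale + c * scale * scale
  let total : Int := PySem.Int.floordiv (f_lo + f_hi) 2
  let total : Int := pvLoopA a b c lo scale h n 1 total
  PySem.Int.floordiv (total * h) (scale * scale)

-- ===== PORT B =====
def trapezoid_integrate_scaled_alt (a : Int) (b : Int) (c : Int) (lo : Int) (hi : Int) (n : Int) (scale : Int) : Int :=
  let h : Int := PySem.Int.floordiv (hi - lo) n
  let m : Int := if n > 1 then n - 1 else 0
  let s1 : Int := PySem.Int.floordiv (m * (m + 1)) 2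
  let s2 : Int := PySem.Int.floordiv (m * (m + 1) * (2 * m + 1)) 6
  let sx : Int := m * lo + h * s1
  let sxx : Int := m * lo * lo + 2 * lo * h * s1 + h * h * s2
  let f_lo : Int := a * lo * lo + b * lo * scale + c * scale * scale
  let f_hi : Int := a * hi * hi + b * hi * scale + c * scale * scale
  let total : Int := PySem.Int.floordiv (f_lo + f_hi) 2 + a * sxx + b * scale * sx + m * c * scale * scale
  PySem.Int.floordiv (total * h) (scale * scale)

-- ===== PRECONDITION & SPEC =====
-- Pre_ excludes exactly the inputs where Python A raises ZeroDivisionError: n = 0 ('// n') or scale = 0 ('// (scale*scale)').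
def Pre_trapezoid_integrate_scaled (a : Int) (b : Int) (c : Int) (lo : Int) (hi : Int) (n : Int) (scale : Int) : Prop := n ≠ 0 ∧ scale ≠ 0
instance (a : Int) (b : Int) (c : Int) (lo : Int) (hi : Int) (n : Int) (scale : Int) : Decidable (Pre_trapezoid_integrate_scaled a b c lo hi n scale) := by unfold Pre_trapezoid_integrate_scaled; infer_instance

def pvWitness_trapezoid_integrate_scaled : Int × Int × Int × Int × Int × Int × Int := (1, 1, 1, 0, 10, 5, 1)

def Spec_trapezoid_integrate_scaled (a : Int) (b : Int) (c : Int) (lo : Int) (hi : Int) (n : Int) (scale : Int) (out : Int) : Prop := out = trapezoid_integrate_scaled_alt a b c lo hi n scale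
instance (a : Int) (b : Int) (c : Int) (lo : Int) (hi : Int) (n : Int) (scale : Int) (out : Int) : Decidable (Spec_trapezoid_integrate_scaled a b c lo hi n scale out) := by unfold Spec_trapezoid_integrate_scaled; infer_instance

-- ===== CLAIM (what is proved, stated in full; the proofs are below) =====
def Claim_equal_trapezoid_integrate_scaled : Prop := ∀ (a : Int) (b : Int) (c : Int) (lo : Int) (hi : Int) (n : Int) (scale : Int), Dom_trapezoid_integrate_scaled a b c lo hi n scale → Pre_trapezoid_integrate_scaled a b c lo hi n scale → Spec_trapezoid_integrate_scaled a b c lo hi n scale (trapezoid_integrate_scaled a b c lo hi n scale)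

-- ===== LEMMAS AND PROOFS =====

-- the integrand of A's loop
def pvG (a b c lo scale h : Int) (j : Int) : Int :=
  a * (lo + j * h) * (lo + j * h) + b * (lo + j * h) * scale + c * scale * scale

-- triangular and square-pyramidal sums
def pvT1 : Nat → Int
  | 0 => 0
  | m + 1 => pvT1 m + ((m : Int) + 1)

def pvT2 : Nat → Int
  | 0 => 0
  | m + 1 => pvT2 m + ((m : Int) + 1) * ((m : Int) + 1)

-- prefix sum of pvG over j = 1..m
def pvS (a b c lo scale h : Int) : Nat → Int
  | 0 => 0
  | m + 1 => pvS a b c lo scale h m + pvG a b c lo scale h ((m : Int) + 1)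

lemma pvT1_two (m : Nat) : 2 * pvT1 m = (m : Int) * ((m : Int) + 1) := by
  induction m with
  | zero => simp [pvT1]
  | succ k ih => simp only [pvT1]; push_cast; ring_nf; ring_nf at ih; linarith

lemma pvT2_six (m : Nat) : 6 * pvT2 m = (m : Int) * ((m : Int) + 1) * (2 * (m : Int) + 1) := by
  induction m with
  | zero => simp [pvT2]
  | succ k ih => simp only [pvT2]; push_cast; ring_nf; ring_nf at ih; linarith

lemma pvS_closed (a b c lo scale h : Int) (m : Nat) :
    pvS a b c lo scale h m =
      a * ((m : Int) * lo * lo + 2 * lo * h * pvT1 m + h * h * pvT2 m)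
        + b * scale * ((m : Int) * lo + h * pvT1 m) + (m : Int) * c * scale * scale := by
  induction m with
  | zero => simp [pvS, pvT1, pvT2]
  | succ k ih =>
    simp only [pvS, pvT1, pvT2, pvG, ih]; push_cast; ring

lemma pvLoopA_eq (a b c lo scale h n : Int) (i total : Int) (h1 : 1 ≤ i) (h2 : i ≤ n) :
    pvLoopA a b c lo scale h n i total =
      total + (pvS a b c lo scale h ((n - 1).toNat) - pvS a b c lo scale h ((i - 1).toNat)) := by
  by_cases hin : i < n
  · rw [pvLoopA]
    simp only [hin, if_true]
    rw [pvLoopA_eq a b c lo scale h n (i + 1) _ (by omega) (by omega)]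
    have hi1 : (i + 1 - 1).toNat = (i - 1).toNat + 1 := by omega
    have hcast : ((i - 1).toNat : Int) + 1 = i := by omega
    rw [hi1]
    simp only [pvS, hcast, pvG]
    ring
  · rw [pvLoopA]
    simp only [hin, if_false]
    have : (i - 1).toNat = (n - 1).toNat := by omega
    rw [this]; ring
termination_by (n - i).toNat
decreasing_by omega

lemma floordiv_two_mul (t : Int) : PySem.Int.floordiv (2 * t) 2 = t := by
  rw [PySem.Int.floordiv_eq_ediv_of_pos (by norm_num)]
  exact Int.mul_ediv_cancel_left t (by norm_num)

lemma floordiv_six_mul (t : Int) : PySem.Int.floordiv (6 * t) 6 = t := by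
  rw [PySem.Int.floordiv_eq_ediv_of_pos (by norm_num)]
  exact Int.mul_ediv_cancel_left t (by norm_num)

-- ===== VERDICT (by name: the statement is the Claim_ definition above) =====
theorem trapezoid_integrate_scaled_spec : Claim_equal_trapezoid_integrate_scaled := by
  intro a b c lo hi n scale _ _
  show _ = _
  simp only [trapezoid_integrate_scaled, trapezoid_integrate_scaled_alt]
  set h : Int := PySem.Int.floordiv (hi - lo) n with hh
  by_cases hn : n > 1
  · -- loop runs: m = n - 1 interior points
    obtain ⟨m, hmc⟩ : ∃ m : Nat, (m : Int) = n - 1 := ⟨(n - 1).toNat, by omega⟩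
    have hs1 : PySem.Int.floordiv ((m : Int) * ((m : Int) + 1)) 2 = pvT1 m := by
      rw [← pvT1_two m, floordiv_two_mul]
    have hs2 : PySem.Int.floordiv ((m : Int) * ((m : Int) + 1) * (2 * (m : Int) + 1)) 6 = pvT2 m := by
      rw [← pvT2_six m, floordiv_six_mul]
    rw [pvLoopA_eq a b c lo scale h n 1 _ le_rfl (by omega), if_pos hn, ← hmc]
    have ht : ((m : Int)).toNat = m := by omega
    have ht0 : ((1 : Int) - 1).toNat = 0 := by omega
    rw [ht, ht0, hs1, hs2, pvS_closed]
    simp only [pvS]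
    ring_nf
  · -- loop does not run, m = 0
    have h0 : ¬ (1 : Int) < n := by omega
    rw [pvLoopA]
    simp only [h0, if_false]
    norm_num [PySem.Int.floordiv]
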